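-- pv_equiv track=rewrite | github.com/pypi-data/pypi-mirror-370 | packages/reqsync/reqsync-0.1.1-py3-none-any.whl/reqsync/env.py | _allowlisted_pip_args
-- ===== SOURCE A (Python) =====
-- import shlex
--
-- _ALLOWED_PIP_FLAGS = {
--     "--index-url",
--     "--extra-index-url",
--     "--trusted-host",
--     "--find-links",
--     "--no-deps",
-- }
--
-- def _allowlisted_pip_args(extra_args: str) -> list[str]:
--     if not extra_args.strip():
--         return []
--     tokens = shlex.split(extra_args)
--     out: list[str] = []
--     i = 0
--     while i < len(tokens):
--         t = tokens[i]
--         name, eq, val = t.partition("=")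
--         if name in _ALLOWED_PIP_FLAGS:
--             if name in {"--index-url", "--extra-index-url", "--trusted-host", "--find-links"}:
--                 if eq:
--                     out.append(t)  # --flag=value
--                 else:
--                     out.append(t)  # --flag value
--                     if i + 1 < len(tokens) and not tokens[i + 1].startswith("-"):
--                         out.append(tokens[i + 1])
--                         i += 1
--             else:
--                 out.append(t)  # switches like --no-deps
--         else:
--             # drop unknown flag and its value if provided separately
--             if not eq and i + 1 < len(tokens) and not tokens[i + 1].startswith("-"):
--                 i += 1
--         i += 1
--     return out
-- ===== SOURCE B (Python) =====
-- _VALUE_FLAGS = {"--index-url", "--extra-index-url", "--trusted-host", "--find-links"}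
--
--
-- def _tokenize(s: str) -> list[str]:
--     """POSIX shlex-style split: whitespace-separated tokens, '...' and "..." quoting,
--     backslash escapes (inside "..." only \\ and \" are special). Raises ValueError on
--     an unclosed quote or a trailing escape, like shlex.split."""
--     tokens: list[str] = []
--     cur = ""
--     started = False
--     state = "n"  # n normal, e escape, s single-quote, d double-quote, de escape in double-quote
--     for c in s:
--         if state == "n":
--             if c in " \t\r\n":
--                 if started:
--                     tokens.append(cur)
--                 cur, started = "", False
--             elif c == "'":
--                 state, started = "s", True
--             elif c == '"':
--                 state, started = "d", True
--             elif c == "\\":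
--                 state, started = "e", True
--             else:
--                 cur += c
--                 started = True
--         elif state == "e":
--             cur += c
--             state = "n"
--         elif state == "s":
--             if c == "'":
--                 state = "n"
--             else:
--                 cur += c
--         elif state == "d":
--             if c == '"':
--                 state = "n"
--             elif c == "\\":
--                 state = "de"
--             else:
--                 cur += c
--         else:  # de
--             cur += c if c in '\\"' else "\\" + c
--             state = "d"
--     if state != "n":
--         raise ValueError("No closing quotation" if state in "sd" else "No escaped character")
--     if started:
--         tokens.append(cur)
--     return tokens
--
--
-- def _allowlisted_pip_args(extra_args: str) -> list[str]:
--     if not extra_args.strip():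
--         return []
--     out: list[str] = []
--     mode = 0  # 0 normal, 1 awaiting value of allowed flag, 2 awaiting value of unknown flag
--     for t in _tokenize(extra_args):
--         if mode:
--             m, mode = mode, 0
--             if not t.startswith("-"):
--                 if m == 1:
--                     out.append(t)
--                 continue
--         name, eq, _ = t.partition("=")
--         if name == "--no-deps":
--             out.append(t)
--         elif name in _VALUE_FLAGS:
--             out.append(t)
--             if not eq:
--                 mode = 1
--         elif not eq:
--             mode = 2
--     return out
-- ===== Notes on version B (the rewrite author's own statement) =====
-- stated objective: faster
-- what changed: Replaced A's index-based while loop with tokens[i+1] lookahead by a single forward loop carrying a mode state (normal / awaiting allowed value / awaiting unknown value), and replaced the shlex.split call by a direct one-pass character state machine with the same POSIX quoting semantics.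
import Mathlib
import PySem

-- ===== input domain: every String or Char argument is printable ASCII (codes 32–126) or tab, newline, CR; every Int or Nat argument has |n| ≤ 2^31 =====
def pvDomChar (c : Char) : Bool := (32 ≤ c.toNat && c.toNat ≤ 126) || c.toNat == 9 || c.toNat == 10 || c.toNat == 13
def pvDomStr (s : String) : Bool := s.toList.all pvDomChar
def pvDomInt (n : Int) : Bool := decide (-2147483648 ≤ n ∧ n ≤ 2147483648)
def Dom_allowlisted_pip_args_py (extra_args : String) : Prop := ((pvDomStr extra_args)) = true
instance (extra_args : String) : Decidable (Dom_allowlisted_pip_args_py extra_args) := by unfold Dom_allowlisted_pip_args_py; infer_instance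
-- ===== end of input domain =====

set_option maxHeartbeats 1000000


-- B replaces A's while-loop with explicit index and tokens[i+1] lookahead by a single
-- forward fold carrying a small "mode" state (normal / awaiting allowed value / awaiting
-- unknown value); objective: alternative decomposition, same linear cost.

-- ===== shared helpers: shlex.split (POSIX mode, whitespace_split), exact on the
-- printable-ASCII + tab/newline/CR domain; returns none exactly where Python's
-- shlex.split raises ValueError (unclosed quote / trailing escape). Both Pythons call
-- this same stdlib function, so both ports share this transcription of it. =====

inductive ShSt | norm | esc | sq | dq | dqesc
deriving DecidableEq, Repr

def shWS (c : Char) : Bool := c = ' ' || c = '\t' || c = '\r' || c = '\n'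

/-- one-char-per-step state machine for shlex.split (posix, whitespace_split). -/
def shlexScan : List Char → ShSt → List Char → Bool → List String → Option (List String)
  | [], st, cur, started, acc =>
      match st with
      | ShSt.norm => some (if started then acc ++ [String.mk cur] else acc)
      | _ => none
  | c :: r, st, cur, started, acc =>
      match st with
      | ShSt.norm =>
          if shWS c then
            shlexScan r ShSt.norm [] false (if started then acc ++ [String.mk cur] else acc)
          else if c = '\'' then shlexScan r ShSt.sq cur true acc
          else if c = '"' then shlexScan r ShSt.dq cur true acc
          else if c = '\\' then shlexScan r ShSt.esc cur true acc
          else shlexScan r ShSt.norm (cur ++ [c]) true acc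
      | ShSt.esc => shlexScan r ShSt.norm (cur ++ [c]) started acc
      | ShSt.sq =>
          if c = '\'' then shlexScan r ShSt.norm cur started acc
          else shlexScan r ShSt.sq (cur ++ [c]) started acc
      | ShSt.dq =>
          if c = '"' then shlexScan r ShSt.norm cur started acc
          else if c = '\\' then shlexScan r ShSt.dqesc cur started acc
          else shlexScan r ShSt.dq (cur ++ [c]) started acc
      | ShSt.dqesc =>
          if c = '\\' || c = '"' then shlexScan r ShSt.dq (cur ++ [c]) started acc
          else shlexScan r ShSt.dq (cur ++ ['\\', c]) started acc

def shlexSplit? (s : String) : Option (List String) :=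
  shlexScan s.toList ShSt.norm [] false []

/-- t.partition("=") as far as A/B use it: the part before the first '=' and whether '=' occurs. -/
def partEqChars : List Char → List Char × Bool
  | [] => ([], false)
  | c :: r => if c = '=' then ([], true) else
      let p := partEqChars r
      (c :: p.1, p.2)

def partName (t : String) : String := String.mk (partEqChars t.toList).1
def partHasEq (t : String) : Bool := (partEqChars t.toList).2

def allowedPipFlags : List String :=
  ["--index-url", "--extra-index-url", "--trusted-host", "--find-links", "--no-deps"]

def valuePipFlags : List String :=
  ["--index-url", "--extra-index-url", "--trusted-host", "--find-links"]

-- ===== PORT A =====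
-- A's while loop with index i and lookahead tokens[i+1], transcribed as recursion on the
-- remaining token list (lookahead = head of the tail; 'i += 1' twice = drop the next token).
def loopA : List String → List String → List String
  | [], out => out
  | t :: rest, out =>
      if partName t ∈ allowedPipFlags then
        if partName t ∈ valuePipFlags then
          if partHasEq t then loopA rest (out ++ [t])
          else
            match rest with
            | [] => loopA [] (out ++ [t])
            | n :: rest' =>
                if PySem.Str.startswith n "-" then loopA (n :: rest') (out ++ [t])
                else loopA rest' (out ++ [t, n])
        else loopA rest (out ++ [t])
      else
        if !partHasEq t then
          match rest with
          | [] => loopA [] out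
          | n :: rest' =>
              if PySem.Str.startswith n "-" then loopA (n :: rest') out
              else loopA rest' out
        else loopA rest out

def allowlisted_pip_args_py (extra_args : String) : List String :=
  if (PySem.Str.strip extra_args).toList = [] then []
  else
    match shlexSplit? extra_args with
    | none => []   -- shlex.split raises ValueError here; excluded by Pre_
    | some tokens => loopA tokens []

-- ===== PORT B =====
inductive PipMode | norm | awaitAllowed | awaitUnknown
deriving DecidableEq, Repr

/-- normal-mode processing of one token (B's fall-through body). -/
def normalStep (out : List String) (t : String) : PipMode × List String :=
  let name := partName t
  let eq := partHasEq t
  if name = "--no-deps" then (PipMode.norm, out ++ [t])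
  else if name ∈ valuePipFlags then
    if eq then (PipMode.norm, out ++ [t]) else (PipMode.awaitAllowed, out ++ [t])
  else if !eq then (PipMode.awaitUnknown, out)
  else (PipMode.norm, out)

def stepB (st : PipMode × List String) (t : String) : PipMode × List String :=
  match st with
  | (PipMode.awaitAllowed, out) =>
      if !PySem.Str.startswith t "-" then (PipMode.norm, out ++ [t]) else normalStep out t
  | (PipMode.awaitUnknown, out) =>
      if !PySem.Str.startswith t "-" then (PipMode.norm, out) else normalStep out t
  | (PipMode.norm, out) => normalStep out t

def allowlisted_pip_args_py_alt (extra_args : String) : List String :=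
  if (PySem.Str.strip extra_args).toList = [] then []
  else
    match shlexSplit? extra_args with
    | none => []   -- shlex.split raises ValueError here; excluded by Pre_
    | some tokens => (tokens.foldl stepB (PipMode.norm, [])).2

-- ===== PRECONDITION & SPEC =====
-- Pre_ excludes exactly the ill-quoted strings (an unclosed ' or " quote, or a trailing
-- backslash), on which shlex.split — called by both A and B — raises ValueError.
def wellQuotedGo : List Char → ShSt → Bool
  | [], st => st = ShSt.norm
  | c :: r, st =>
      match st with
      | ShSt.norm =>
          if c = '\'' then wellQuotedGo r ShSt.sq
          else if c = '"' then wellQuotedGo r ShSt.dq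
          else if c = '\\' then wellQuotedGo r ShSt.esc
          else wellQuotedGo r ShSt.norm
      | ShSt.esc => wellQuotedGo r ShSt.norm
      | ShSt.sq => if c = '\'' then wellQuotedGo r ShSt.norm else wellQuotedGo r ShSt.sq
      | ShSt.dq =>
          if c = '"' then wellQuotedGo r ShSt.norm
          else if c = '\\' then wellQuotedGo r ShSt.dqesc
          else wellQuotedGo r ShSt.dq
      | ShSt.dqesc => wellQuotedGo r ShSt.dq

def Pre_allowlisted_pip_args_py (extra_args : String) : Prop :=
  wellQuotedGo extra_args.toList ShSt.norm = true

instance (extra_args : String) : Decidable (Pre_allowlisted_pip_args_py extra_args) := by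
  unfold Pre_allowlisted_pip_args_py; infer_instance

def pvWitness_allowlisted_pip_args_py : String :=
  "--index-url https://x --foo bar --no-deps"

def Spec_allowlisted_pip_args_py (extra_args : String) (out : List String) : Prop :=
  out = allowlisted_pip_args_py_alt extra_args

instance (extra_args : String) (out : List String) : Decidable (Spec_allowlisted_pip_args_py extra_args out) := by
  unfold Spec_allowlisted_pip_args_py; infer_instance

-- ===== CLAIM (what is proved, stated in full; the proofs are below) =====
def Claim_equal_allowlisted_pip_args_py : Prop := ∀ (extra_args : String), Dom_allowlisted_pip_args_py extra_args → Pre_allowlisted_pip_args_py extra_args → Spec_allowlisted_pip_args_py extra_args (allowlisted_pip_args_py extra_args)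

-- ===== LEMMAS AND PROOFS =====

/-- a well-quoted remainder is always scanned successfully (no ValueError). -/
theorem shlexScan_isSome : ∀ (cs : List Char) (st : ShSt) (cur : List Char) (b : Bool)
    (acc : List String), wellQuotedGo cs st = true → (shlexScan cs st cur b acc).isSome := by
  intro cs
  induction cs with
  | nil =>
      intro st cur b acc h
      cases st <;> simp [wellQuotedGo] at h <;> simp [shlexScan]
  | cons c r ih =>
      intro st cur b acc h
      have e1 : ¬(('"' : Char) = '\'') := by decide
      have e2 : ¬(('\\' : Char) = '\'') := by decide
      have e3 : ¬(('\\' : Char) = '"') := by decide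
      cases st with
      | norm =>
          by_cases h1 : c = '\''
          · subst h1
            rw [wellQuotedGo, if_pos rfl] at h
            simpa [shlexScan, shWS] using ih _ _ _ _ h
          · by_cases h2 : c = '"'
            · subst h2
              rw [wellQuotedGo, if_neg e1, if_pos rfl] at h
              simpa [shlexScan, shWS] using ih _ _ _ _ h
            · by_cases h3 : c = '\\'
              · subst h3
                rw [wellQuotedGo, if_neg e2, if_neg e3, if_pos rfl] at h
                simpa [shlexScan, shWS] using ih _ _ _ _ h
              · rw [wellQuotedGo, if_neg h1, if_neg h2, if_neg h3] at h
                by_cases hw : shWS c = true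
                · simpa [shlexScan, hw, h1, h2, h3] using ih _ _ _ _ h
                · simpa [shlexScan, hw, h1, h2, h3] using ih _ _ _ _ h
      | esc =>
          rw [wellQuotedGo] at h
          simpa [shlexScan] using ih _ _ _ _ h
      | sq =>
          by_cases h1 : c = '\''
          · subst h1
            rw [wellQuotedGo, if_pos rfl] at h
            simpa [shlexScan] using ih _ _ _ _ h
          · rw [wellQuotedGo, if_neg h1] at h
            simpa [shlexScan, h1] using ih _ _ _ _ h
      | dq =>
          by_cases h1 : c = '"'
          · subst h1
            rw [wellQuotedGo, if_pos rfl] at h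
            simpa [shlexScan] using ih _ _ _ _ h
          · by_cases h2 : c = '\\'
            · subst h2
              rw [wellQuotedGo, if_neg e3, if_pos rfl] at h
              simpa [shlexScan, h1] using ih _ _ _ _ h
            · rw [wellQuotedGo, if_neg h1, if_neg h2] at h
              simpa [shlexScan, h1, h2] using ih _ _ _ _ h
      | dqesc =>
          rw [wellQuotedGo] at h
          by_cases h1 : (c = '\\' || c = '"') = true
          · simpa [shlexScan, h1] using ih _ _ _ _ h
          · simpa [shlexScan, h1] using ih _ _ _ _ h

/-- a token starting with '-' is processed by an awaiting mode exactly as by the normal mode. -/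
theorem stepB_dash (m : PipMode) (out : List String) (t : String)
    (h : PySem.Str.startswith t "-" = true) : stepB (m, out) t = stepB (PipMode.norm, out) t := by
  simp only [PySem.Str.startswith_eq] at h
  have h' : PySem.Chars.startswith t.toList ['-'] = true := h
  cases m <;> simp [stepB, h']

theorem noDeps_not_value (s : String) (h : s ∈ valuePipFlags) : s ≠ "--no-deps" := by
  simp only [valuePipFlags, List.mem_cons, List.not_mem_nil, or_false] at h
  rcases h with h | h | h | h <;> subst h <;> decide

theorem allowed_not_value (s : String) (h1 : s ∈ allowedPipFlags) (h2 : s ∉ valuePipFlags) :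
    s = "--no-deps" := by
  simp only [allowedPipFlags, valuePipFlags, List.mem_cons, List.not_mem_nil, or_false] at h1 h2
  rcases h1 with h | h | h | h | h <;> subst h <;> simp at h2 ⊢

theorem not_allowed_facts (s : String) (h : s ∉ allowedPipFlags) :
    s ≠ "--no-deps" ∧ s ∉ valuePipFlags := by
  constructor
  · intro hs; exact h (by simp [allowedPipFlags, hs])
  · intro hs
    apply h
    simp only [valuePipFlags, List.mem_cons, List.not_mem_nil, or_false] at hs
    rcases hs with h' | h' | h' | h' <;> simp [allowedPipFlags, h']

theorem foldB_eq_loopA (ts : List String) (out : List String) :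
    (ts.foldl stepB (PipMode.norm, out)).2 = loopA ts out := by
  induction ts, out using loopA.induct with
  | case1 out => rw [loopA.eq_def]; simp
  | case2 t rest out h1 h2 h3 ih =>
      -- allowed value flag with '='
      have hnd := noDeps_not_value _ h2
      have s1 : stepB (PipMode.norm, out) t = (PipMode.norm, out ++ [t]) := by
        simp [stepB, normalStep, hnd, h2, h3]
      rw [loopA.eq_def]
      simpa [s1, h1, h2, h3] using ih
  | case3 t out h1 h2 h3 ih =>
      -- allowed value flag, no '=', no next token
      have hnd := noDeps_not_value _ h2
      have s1 : stepB (PipMode.norm, out) t = (PipMode.awaitAllowed, out ++ [t]) := by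
        simp [stepB, normalStep, hnd, h2, h3]
      rw [loopA.eq_def]
      simpa [s1, h1, h2, h3] using ih
  | case4 t out h1 h2 h3 n rest' hdash ih =>
      -- allowed value flag, no '=', next token starts with '-': reprocessed normally
      have hnd := noDeps_not_value _ h2
      have s1 : stepB (PipMode.norm, out) t = (PipMode.awaitAllowed, out ++ [t]) := by
        simp [stepB, normalStep, hnd, h2, h3]
      have hdash' : PySem.Chars.startswith n.toList ['-'] = true := by simpa using hdash
      rw [loopA.eq_def]
      simpa [s1, stepB_dash PipMode.awaitAllowed (out ++ [t]) n hdash, h1, h2, h3, hdash'] using ih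
  | case5 t out h1 h2 h3 n rest' hdash ih =>
      -- allowed value flag, no '=', next token is its value
      have hnd := noDeps_not_value _ h2
      have s1 : stepB (PipMode.norm, out) t = (PipMode.awaitAllowed, out ++ [t]) := by
        simp [stepB, normalStep, hnd, h2, h3]
      have hdash' : PySem.Chars.startswith n.toList ['-'] = false := by simpa using hdash
      have s2 : stepB (PipMode.awaitAllowed, out ++ [t]) n = (PipMode.norm, out ++ [t] ++ [n]) := by
        simp [stepB, hdash']
      rw [loopA.eq_def]
      simpa [s1, s2, h1, h2, h3, hdash'] using ih
  | case6 t rest out h1 h2 ih =>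
      -- --no-deps (allowed switch)
      have hd := allowed_not_value _ h1 h2
      have s1 : stepB (PipMode.norm, out) t = (PipMode.norm, out ++ [t]) := by
        simp [stepB, normalStep, hd]
      rw [loopA.eq_def]
      simpa [s1, h1, h2] using ih
  | case7 t out h1 h2 ih =>
      -- unknown flag without '=', no next token
      obtain ⟨hnd, hnv⟩ := not_allowed_facts _ h1
      have he : partHasEq t = false := by simpa using h2
      have s1 : stepB (PipMode.norm, out) t = (PipMode.awaitUnknown, out) := by
        simp [stepB, normalStep, hnd, hnv, he]
      rw [loopA.eq_def]
      simpa [s1, h1, h2] using ih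
  | case8 t out h1 h2 n rest' hdash ih =>
      -- unknown flag without '=', next starts with '-': reprocessed normally
      obtain ⟨hnd, hnv⟩ := not_allowed_facts _ h1
      have he : partHasEq t = false := by simpa using h2
      have s1 : stepB (PipMode.norm, out) t = (PipMode.awaitUnknown, out) := by
        simp [stepB, normalStep, hnd, hnv, he]
      have hdash' : PySem.Chars.startswith n.toList ['-'] = true := by simpa using hdash
      rw [loopA.eq_def]
      simpa [s1, stepB_dash PipMode.awaitUnknown out n hdash, h1, h2, hdash'] using ih
  | case9 t out h1 h2 n rest' hdash ih =>
      -- unknown flag without '=': its value is dropped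
      obtain ⟨hnd, hnv⟩ := not_allowed_facts _ h1
      have he : partHasEq t = false := by simpa using h2
      have s1 : stepB (PipMode.norm, out) t = (PipMode.awaitUnknown, out) := by
        simp [stepB, normalStep, hnd, hnv, he]
      have hdash' : PySem.Chars.startswith n.toList ['-'] = false := by simpa using hdash
      have s2 : stepB (PipMode.awaitUnknown, out) n = (PipMode.norm, out) := by
        simp [stepB, hdash']
      rw [loopA.eq_def]
      simpa [s1, s2, h1, h2, hdash'] using ih
  | case10 t rest out h1 h2 ih =>
      -- unknown flag with '=': dropped, nothing consumed
      obtain ⟨hnd, hnv⟩ := not_allowed_facts _ h1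
      have he : partHasEq t = true := by simpa using h2
      have s1 : stepB (PipMode.norm, out) t = (PipMode.norm, out) := by
        simp [stepB, normalStep, hnd, hnv, he]
      rw [loopA.eq_def]
      simpa [s1, h1, h2, he] using ih

-- ===== VERDICT (by name: the statement is the Claim_ definition above) =====
theorem allowlisted_pip_args_py_spec : Claim_equal_allowlisted_pip_args_py := by
  intro s _ hpre
  unfold Spec_allowlisted_pip_args_py allowlisted_pip_args_py allowlisted_pip_args_py_alt
  split
  · rfl
  · cases h : shlexSplit? s with
    | none =>
        have hs := shlexScan_isSome s.toList ShSt.norm [] false [] hpre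
        unfold shlexSplit? at h
        rw [h] at hs
    | some ts => exact (foldB_eq_loopA ts []).symm
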